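-- pv_equiv track=rewrite | github.com/priyanga-ganapathi-zoomrx/indication-extraction-agent | src/drug_class_selection_processor.py | transform_extraction_to_selection_input
-- ===== SOURCE A (Python) =====
-- from typing import Dict, List, Tuple
--
-- def transform_extraction_to_selection_input(
--     extraction_details: List[Dict],
-- ) -> List[Dict[str, str]]:
--     """Transform extraction_details to selection input format.
--
--     Args:
--         extraction_details: List of extraction detail dicts from extraction output
--             Each dict has: extracted_text, class_type, normalized_form, evidence, source, rules_applied
--
--     Returns:
--         List of dicts with 'drug_class' and 'class_type' for selection input
--     """
--     selection_input = []
--     seen_classes = set()  # Deduplicate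
--
--     for detail in extraction_details:
--         drug_class = detail.get('normalized_form', detail.get('extracted_text', ''))
--         class_type = detail.get('class_type', 'Therapeutic')  # Default to Therapeutic if missing
--
--         if drug_class and drug_class not in seen_classes:
--             seen_classes.add(drug_class)
--             selection_input.append({
--                 'drug_class': drug_class,
--                 'class_type': class_type,
--             })
--
--     return selection_input
-- ===== SOURCE B (Python) =====
-- def transform_extraction_to_selection_input(extraction_details):
--     """Backward pass, no seen-set: walk the details from last to first; for each
--     nonempty drug_class, prepend its record and filter out any later record with
--     the same drug_class, so the first occurrence ends up winning."""
--     result = []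
--     for detail in reversed(extraction_details):
--         drug_class = detail.get('normalized_form', detail.get('extracted_text', ''))
--         if drug_class:
--             result = [{
--                 'drug_class': drug_class,
--                 'class_type': detail.get('class_type', 'Therapeutic'),
--             }] + [r for r in result if r['drug_class'] != drug_class]
--     return result
-- ===== Notes on version B (the rewrite author's own statement) =====
-- stated objective: alternative
-- what changed: Replaces A's forward pass with a seen-set by a backward traversal with no auxiliary set: each nonempty drug_class record is prepended and later records with the same drug_class are filtered out of the accumulator, trading the set for filtering (O(n^2) worst case).
import Mathlib
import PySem

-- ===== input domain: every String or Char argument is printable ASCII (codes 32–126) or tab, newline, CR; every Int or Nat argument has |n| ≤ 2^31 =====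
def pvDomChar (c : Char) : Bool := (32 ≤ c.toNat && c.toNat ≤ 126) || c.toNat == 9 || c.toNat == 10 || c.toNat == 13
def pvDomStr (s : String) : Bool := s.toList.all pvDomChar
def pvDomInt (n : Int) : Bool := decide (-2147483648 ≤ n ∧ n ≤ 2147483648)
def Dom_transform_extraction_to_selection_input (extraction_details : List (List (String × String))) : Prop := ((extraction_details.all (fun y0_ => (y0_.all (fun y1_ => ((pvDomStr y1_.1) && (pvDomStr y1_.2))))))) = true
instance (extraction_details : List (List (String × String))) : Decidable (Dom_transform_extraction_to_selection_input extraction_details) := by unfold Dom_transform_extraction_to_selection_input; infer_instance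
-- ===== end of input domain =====

-- B walks the details backwards with no seen-set: each nonempty drug_class record is
-- prepended and later records with the same drug_class are filtered out of the accumulator
-- (alternative decomposition; O(n^2) worst case vs A's set-based O(n)).

-- shared helper: Python's detail.get(k, dflt) — first match in the association list
def pvGetD (detail : List (String × String)) (k : String) (dflt : String) : String :=
  (detail.lookup k).getD dflt

-- ===== PORT A =====
def transform_extraction_to_selection_input (extraction_details : List (List (String × String))) : List (List (String × String)) :=
  (extraction_details.foldl
    (fun (st : List (List (String × String)) × PySem.Set String) detail =>
      let drug_class := pvGetD detail "normalized_form" (pvGetD detail "extracted_text" "")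
      let class_type := pvGetD detail "class_type" "Therapeutic"
      if drug_class ≠ "" ∧ ¬ (PySem.Set.contains st.2 drug_class = true) then
        (st.1 ++ [[("drug_class", drug_class), ("class_type", class_type)]],
         PySem.Set.add st.2 drug_class)
      else st)
    ([], PySem.Set.empty)).1

-- ===== PORT B =====
-- 'for detail in reversed(ed): result = …' consumes the last element first, i.e. a foldr
def transform_extraction_to_selection_input_alt (extraction_details : List (List (String × String))) : List (List (String × String)) :=
  extraction_details.foldr
    (fun detail result =>
      let drug_class := pvGetD detail "normalized_form" (pvGetD detail "extracted_text" "")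
      if drug_class ≠ "" then
        [("drug_class", drug_class), ("class_type", pvGetD detail "class_type" "Therapeutic")] ::
          result.filter (fun r => pvGetD r "drug_class" "" ≠ drug_class)
      else result)
    []

-- ===== PRECONDITION & SPEC =====
def Spec_transform_extraction_to_selection_input (extraction_details : List (List (String × String))) (out : List (List (String × String))) : Prop := out = transform_extraction_to_selection_input_alt extraction_details
instance (extraction_details : List (List (String × String))) (out : List (List (String × String))) : Decidable (Spec_transform_extraction_to_selection_input extraction_details out) := by unfold Spec_transform_extraction_to_selection_input; infer_instance

-- ===== CLAIM (what is proved, stated in full; the proofs are below) =====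
def Claim_equal_transform_extraction_to_selection_input : Prop := ∀ (extraction_details : List (List (String × String))), Dom_transform_extraction_to_selection_input extraction_details → Spec_transform_extraction_to_selection_input extraction_details (transform_extraction_to_selection_input extraction_details)

-- ===== LEMMAS AND PROOFS =====

-- invariant: A's loop from state (sel, seen) produces sel followed by B's (backward-built)
-- result with every record whose drug_class is already in seen filtered away
theorem pv_loop (ed : List (List (String × String)))
    (sel : List (List (String × String))) (seen : PySem.Set String) :
    (ed.foldl
      (fun (st : List (List (String × String)) × PySem.Set String) detail =>
        let drug_class := pvGetD detail "normalized_form" (pvGetD detail "extracted_text" "")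
        let class_type := pvGetD detail "class_type" "Therapeutic"
        if drug_class ≠ "" ∧ ¬ (PySem.Set.contains st.2 drug_class = true) then
          (st.1 ++ [[("drug_class", drug_class), ("class_type", class_type)]],
           PySem.Set.add st.2 drug_class)
        else st)
      (sel, seen)).1
    = sel ++ (transform_extraction_to_selection_input_alt ed).filter
        (fun r => !(PySem.Set.contains seen (pvGetD r "drug_class" ""))) := by
  induction ed generalizing sel seen with
  | nil => simp [transform_extraction_to_selection_input_alt]
  | cons detail rest ih =>
    simp only [transform_extraction_to_selection_input_alt, List.foldr, List.foldl]
    set dc := pvGetD detail "normalized_form" (pvGetD detail "extracted_text" "") with hdc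
    set ct := pvGetD detail "class_type" "Therapeutic" with hct
    by_cases hempty : dc = ""
    · rw [if_neg (by simp [hempty]), if_neg (by simp [hempty])]
      exact ih sel seen
    · rw [if_pos hempty]
      have hkey : pvGetD [("drug_class", dc), ("class_type", ct)] "drug_class" "" = dc := by
        simp [pvGetD, List.lookup]
      by_cases hmem : PySem.Set.contains seen dc = true
      · have hmem' : dc ∈ seen := (PySem.Set.contains_iff seen dc).mp hmem
        rw [if_neg (fun h => h.2 hmem)]
        rw [ih sel seen, List.filter_cons_of_neg (by simp [hkey, hmem']), List.filter_filter]
        congr 1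
        apply List.filter_congr
        intro r _
        by_cases h : pvGetD r "drug_class" "" = dc
        · simp [h, hmem']
        · simp [h]
      · have hnm : dc ∉ seen := fun h => hmem ((PySem.Set.contains_iff seen dc).mpr h)
        rw [if_pos ⟨hempty, fun h => hmem h⟩]
        rw [ih (sel ++ [[("drug_class", dc), ("class_type", ct)]]) (PySem.Set.add seen dc)]
        rw [List.filter_cons_of_pos (by simp [hkey, hnm]), List.filter_filter, List.append_assoc]
        simp only [List.singleton_append]
        congr 2
        apply List.filter_congr
        intro r _
        have hc : ∀ x : String, PySem.Set.contains (PySem.Set.add seen dc) x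
            = (PySem.Set.contains seen x || decide (x = dc)) := by
          intro x
          rw [PySem.Set.add_eq_ite, if_neg hnm]
          simp [List.mem_append]
        rw [hc]
        by_cases h : pvGetD r "drug_class" "" = dc
        · simp [h, hnm]
        · simp [h]

-- ===== VERDICT (by name: the statement is the Claim_ definition above) =====
theorem transform_extraction_to_selection_input_spec : Claim_equal_transform_extraction_to_selection_input := by
  intro ed _
  unfold Spec_transform_extraction_to_selection_input transform_extraction_to_selection_input
  rw [pv_loop ed [] PySem.Set.empty]
  simp [PySem.Set.empty]
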